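-- pv_equiv track=rewrite | github.com/nikolay-e/treemapper | src/treemapper/diffctx/constants.py | expand_config_key
-- ===== SOURCE A (Python) =====
-- CONFIG_KEY_COMMON_PREFIXES = frozenset({"default", "max", "min", "smtp", "http", "https", "api", "db", "app", "allowed"})
--
-- def expand_config_key(key: str) -> set[str]:
--     expanded: set[str] = {key}
--     parts = key.split("_")
--     for part in parts:
--         if len(part) >= 3:
--             expanded.add(part)
--     for prefix in CONFIG_KEY_COMMON_PREFIXES:
--         if key.startswith(prefix + "_") and len(key) > len(prefix) + 1:
--             stripped = key[len(prefix) + 1 :]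
--             expanded.add(stripped)
--             for sub in stripped.split("_"):
--                 if len(sub) >= 3:
--                     expanded.add(sub)
--     return expanded
-- ===== SOURCE B (Python) =====
-- CONFIG_KEY_COMMON_PREFIXES = frozenset({"default", "max", "min", "smtp", "http", "https", "api", "db", "app", "allowed"})
--
-- def expand_config_key(key: str) -> set[str]:
--     parts = key.split("_")
--     expanded: set[str] = {key}
--     for part in parts:
--         if len(part) >= 3:
--             expanded.add(part)
--     # no prefix contains an underscore, so a prefix matches iff it is exactly parts[0];
--     # the sub-parts of the stripped remainder are already covered by the loop above
--     if len(parts) > 1 and parts[0] in CONFIG_KEY_COMMON_PREFIXES: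
--         stripped = key[len(parts[0]) + 1:]
--         if stripped:
--             expanded.add(stripped)
--     return expanded
-- ===== Notes on version B (the rewrite author's own statement) =====
-- stated objective: simpler
-- what changed: Replaces the scan over all ten prefixes with startswith plus the redundant inner split-loop over the stripped remainder by a single membership test of the first underscore-separated part and one conditional add of the non-empty remainder.
import Mathlib
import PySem

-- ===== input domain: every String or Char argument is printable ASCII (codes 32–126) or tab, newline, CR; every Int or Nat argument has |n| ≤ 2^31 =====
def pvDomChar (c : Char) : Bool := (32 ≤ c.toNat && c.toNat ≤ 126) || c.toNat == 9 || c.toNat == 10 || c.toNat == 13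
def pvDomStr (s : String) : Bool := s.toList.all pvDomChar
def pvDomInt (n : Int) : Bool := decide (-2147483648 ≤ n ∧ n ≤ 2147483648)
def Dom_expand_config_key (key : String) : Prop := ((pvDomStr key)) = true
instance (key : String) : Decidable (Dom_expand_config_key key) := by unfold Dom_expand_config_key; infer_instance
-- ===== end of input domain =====

-- B replaces A's scan over all 10 prefixes (startswith + a redundant inner split loop)
-- by one membership test of the first '_'-part and a single conditional add (objective: simpler).

-- ===== PORT A =====
-- CONFIG_KEY_COMMON_PREFIXES (a frozenset; iteration order is irrelevant to the returned set)
def pvPrefixes : PySem.Set String :=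
  PySem.Set.ofList ["default", "max", "min", "smtp", "http", "https", "api", "db", "app", "allowed"]

-- key.split("_"): sep is the non-empty literal "_", so split? always returns some
def pySplitUnd (s : String) : List String := (PySem.Str.split? s "_").getD []

-- the loop 'for part in parts: if len(part) >= 3: expanded.add(part)' (appears verbatim in A twice and in B once)
def pvAddLong (s : PySem.Set String) (parts : List String) : PySem.Set String :=
  parts.foldl (fun s part => if 3 ≤ PySem.Str.len part then PySem.Set.add s part else s) s

def expand_config_key (key : String) : List String :=
  let expanded : PySem.Set String := PySem.Set.add PySem.Set.empty key
  let parts := pySplitUnd key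
  let expanded := pvAddLong expanded parts
  pvPrefixes.foldl (fun s pre =>
    if PySem.Str.startswith key (pre ++ "_") && decide (PySem.Str.len pre + 1 < PySem.Str.len key) then
      let stripped := PySem.Str.slice key (some (PySem.Str.len pre + 1)) none
      pvAddLong (PySem.Set.add s stripped) (pySplitUnd stripped)
    else s) expanded

-- ===== PORT B =====
def expand_config_key_alt (key : String) : List String :=
  let parts := pySplitUnd key
  let expanded := pvAddLong (PySem.Set.add PySem.Set.empty key) parts
  match parts with
  | p0 :: _ :: _ =>
    if PySem.Set.contains pvPrefixes p0 then
      let stripped := PySem.Str.slice key (some (PySem.Str.len p0 + 1)) none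
      if stripped ≠ "" then PySem.Set.add expanded stripped else expanded
    else expanded
  | _ => expanded

-- ===== PRECONDITION & SPEC =====
def Spec_expand_config_key (key : String) (out : List String) : Prop := out = expand_config_key_alt key
instance (key : String) (out : List String) : Decidable (Spec_expand_config_key key out) := by unfold Spec_expand_config_key; infer_instance

-- ===== CLAIM (what is proved, stated in full; the proofs are below) =====
def Claim_equal_expand_config_key : Prop := ∀ (key : String), Dom_expand_config_key key → Spec_expand_config_key key (expand_config_key key)

-- ===== LEMMAS AND PROOFS =====

-- reference splitter: Python's s.split("_") on the character list
def splitU : List Char → List (List Char)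
  | [] => [[]]
  | c :: rest =>
    if c = '_' then [] :: splitU rest
    else match splitU rest with
      | p :: ps => (c :: p) :: ps
      | [] => [[c]]

theorem splitU_ne_nil (cs : List Char) : splitU cs ≠ [] := by
  cases cs with
  | nil => simp [splitU]
  | cons c rest =>
    simp only [splitU]
    split
    · simp
    · split <;> simp

theorem go_spec (fuel : Nat) (l cur : List Char) (acc : List (List Char))
    (h : l.length < fuel) :
    PySem.Chars.splitOn.go ['_'] fuel l cur acc
      = acc.reverse ++ (splitU l).modifyHead (cur.reverse ++ ·) := by
  induction fuel generalizing l cur acc with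
  | zero => omega
  | succ fuel ih =>
    cases l with
    | nil =>
      simp [PySem.Chars.splitOn.go, splitU]
    | cons c rest =>
      rw [PySem.Chars.splitOn.go]
      by_cases hc : c = '_'
      · subst hc
        have hpre : List.isPrefixOf ['_'] ('_' :: rest) = true := by
          simp [List.isPrefixOf]
        simp only [hpre, if_true, List.length_cons] at *
        rw [show List.drop (([] : List Char).length + 1) ('_' :: rest) = rest from by simp]
        rw [ih rest [] (List.reverse cur :: acc) (by omega)]
        simp only [splitU, if_true, List.reverse_cons, List.append_assoc]
        cases hs : splitU rest with
        | nil => exact absurd hs (splitU_ne_nil rest)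
        | cons p ps => simp
      · have hpre : List.isPrefixOf ['_'] (c :: rest) = false := by
          simp only [List.isPrefixOf, Bool.and_eq_false_iff, beq_eq_false_iff_ne, ne_eq]
          left
          exact fun h' => hc h'.symm
        simp only [hpre, Bool.false_eq_true, if_false]
        rw [ih rest (c :: cur) acc (by simp at h; omega)]
        simp only [splitU, hc, if_false]
        cases hs : splitU rest with
        | nil => exact absurd hs (splitU_ne_nil rest)
        | cons p ps => simp

theorem splitOn_eq_splitU (cs : List Char) :
    PySem.Chars.splitOn cs ['_'] = splitU cs := by
  unfold PySem.Chars.splitOn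
  rw [go_spec (cs.length + 1) cs [] [] (by omega)]
  cases hs : splitU cs with
  | nil => exact absurd hs (splitU_ne_nil cs)
  | cons p ps => simp

theorem pySplitUnd_eq (s : String) :
    pySplitUnd s = (splitU s.toList).map String.ofList := by
  unfold pySplitUnd PySem.Str.split?
  have hsep : ("_" : String).toList = ['_'] := by decide
  rw [hsep]
  rw [show PySem.Chars.split? s.toList ['_'] = some (PySem.Chars.splitOn s.toList ['_']) from by
        simp [PySem.Chars.split?]]
  simp [splitOn_eq_splitU]

-- splitU on a string that starts with an underscore-free prefix followed by '_'
theorem splitU_append (a tl : List Char) (ha : '_' ∉ a) :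
    splitU (a ++ '_' :: tl) = a :: splitU tl := by
  induction a with
  | nil => simp [splitU]
  | cons c a ih =>
    have hc : c ≠ '_' := by intro h; exact ha (by simp [h])
    have ha' : '_' ∉ a := fun h => ha (by simp [h])
    simp only [List.cons_append, splitU, hc, if_false, ih ha']

-- converse: at least two parts means the string splits at a first underscore
theorem splitU_two_parts (cs : List Char) (a b : List Char) (ps : List (List Char))
    (h : splitU cs = a :: b :: ps) :
    '_' ∉ a ∧ ∃ tl, cs = a ++ '_' :: tl ∧ splitU tl = b :: ps := by
  induction cs generalizing a b ps with
  | nil => simp [splitU] at h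
  | cons c rest ih =>
    by_cases hc : c = '_'
    · subst hc
      simp only [splitU, if_true] at h
      have h1 : ([] : List Char) = a := (List.cons.injEq _ _ _ _ ▸ h).1
      have htl : splitU rest = b :: ps := (List.cons.injEq _ _ _ _ ▸ h).2
      subst h1
      exact ⟨by simp, rest, by simp, htl⟩
    · simp only [splitU, hc, if_false] at h
      cases hs : splitU rest with
      | nil => exact absurd hs (splitU_ne_nil rest)
      | cons p ps' =>
        rw [hs] at h
        have h1 : c :: p = a := (List.cons.injEq _ _ _ _ ▸ h).1
        have h2 : ps' = b :: ps := (List.cons.injEq _ _ _ _ ▸ h).2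
        obtain ⟨hna, tl, htl, hrest⟩ := ih p b ps (by rw [hs, h2])
        refine ⟨?_, tl, ?_, hrest⟩
        · intro hm
          rcases List.mem_cons.mp (h1 ▸ hm) with h' | h'
          · exact hc h'.symm
          · exact hna h'
        · rw [← h1]; simp [htl]

-- membership in the len>=3 accumulation loop
theorem mem_pvAddLong_mono (s : PySem.Set String) (l : List String) (x : String)
    (h : x ∈ s) : x ∈ pvAddLong s l := by
  induction l generalizing s with
  | nil => simpa [pvAddLong]
  | cons p l ih =>
    simp only [pvAddLong, List.foldl_cons]
    split
    · exact ih _ ((PySem.Set.mem_add _ _ _).mpr (Or.inl h))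
    · exact ih _ h

theorem mem_pvAddLong (s : PySem.Set String) (l : List String) (x : String)
    (hx : x ∈ l) (hlen : 3 ≤ PySem.Str.len x) : x ∈ pvAddLong s l := by
  induction l generalizing s with
  | nil => simp at hx
  | cons p l ih =>
    simp only [pvAddLong, List.foldl_cons]
    rcases List.mem_cons.mp hx with rfl | hx'
    · simp only [hlen, if_pos]
      exact mem_pvAddLong_mono _ _ _ ((PySem.Set.mem_add _ _ _).mpr (Or.inr rfl))
    · split <;> exact ih _ hx'

theorem pvAddLong_of_mem (s : PySem.Set String) (l : List String)
    (h : ∀ x ∈ l, 3 ≤ PySem.Str.len x → x ∈ s) : pvAddLong s l = s := by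
  induction l with
  | nil => simp [pvAddLong]
  | cons p l ih =>
    simp only [pvAddLong, List.foldl_cons]
    by_cases hp : 3 ≤ PySem.Str.len p
    · have hmem : p ∈ s := h p (by simp) hp
      have hadd : PySem.Set.add s p = s := by
        unfold PySem.Set.add
        rw [if_pos (by simpa using hmem)]
      simp only [hp, if_pos, hadd]
      exact ih fun x hx hl => h x (by simp [hx]) hl
    · simp only [hp, if_false]
      exact ih fun x hx hl => h x (by simp [hx]) hl

-- a fold whose body fires on no element is the identity
theorem foldl_none {α : Type} (l : List String) (cond : String → Bool) (g : String → α → α)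
    (s : α) (h : ∀ q ∈ l, cond q = false) :
    l.foldl (fun s q => if cond q then g q s else s) s = s := by
  induction l generalizing s with
  | nil => simp
  | cons q l ih =>
    simp only [List.foldl_cons, h q (by simp), Bool.false_eq_true, if_false]
    exact ih s fun q' hq' => h q' (List.mem_cons_of_mem _ hq')

-- a fold that fires on at most one designated element
theorem foldl_unique {α : Type} (l : List String) (t : String)
    (cond : String → Bool) (g : String → α → α) (s : α)
    (hnd : l.Nodup) (ht : ∀ q ∈ l, cond q = true → q = t) :
    l.foldl (fun s q => if cond q then g q s else s) s
      = if l.contains t && cond t then g t s else s := by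
  induction l generalizing s with
  | nil => simp
  | cons q l ih =>
    simp only [List.foldl_cons]
    by_cases hc : cond q = true
    · have hqt : q = t := ht q (by simp) hc
      subst hqt
      have hnotin : q ∉ l := (List.nodup_cons.mp hnd).1
      have hall : ∀ q' ∈ l, cond q' = false := by
        intro q' hq'
        by_contra h'
        have := ht q' (List.mem_cons_of_mem _ hq') (by simpa using h')
        exact hnotin (this ▸ hq')
      rw [hc, if_pos rfl, foldl_none l cond g (g q s) hall]
      simp
    · simp only [hc, Bool.false_eq_true, if_false]
      rw [ih s (List.nodup_cons.mp hnd).2 (fun q' hq' h' => ht q' (List.mem_cons_of_mem _ hq') h')]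
      by_cases hct : cond t = true
      · have hqt : q ≠ t := fun h => hc (h ▸ hct)
        simp only [hct, Bool.and_true, List.contains_cons]
        by_cases hm : t ∈ l
        · simp [hm]
        · have : t ≠ q := fun h => hqt h.symm
          simp [hm, this]
      · simp [Bool.eq_false_iff.mpr hct]

-- none of the ten prefixes contains an underscore
theorem pvPrefixes_no_underscore : ∀ q ∈ pvPrefixes, '_' ∉ q.toList := by decide

theorem pvPrefixes_nodup : pvPrefixes.Nodup := by decide

-- A's per-prefix condition pins the prefix down to the first part of the split
theorem cond_eq_first (key q : String)
    (hc : (PySem.Str.startswith key (q ++ "_") && decide (PySem.Str.len q + 1 < PySem.Str.len key)) = true) :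
    ∃ tl, key.toList = q.toList ++ '_' :: tl ∧ tl ≠ [] := by
  rw [Bool.and_eq_true, decide_eq_true_iff] at hc
  obtain ⟨hsw, hlen⟩ := hc
  rw [PySem.Str.startswith_eq] at hsw
  have hpre : (q ++ "_").toList <+: key.toList := PySem.Chars.startswith_iff _ _ |>.mp hsw
  rw [String.toList_append] at hpre
  obtain ⟨tl, htl⟩ := hpre
  refine ⟨tl, by simpa using htl.symm, ?_⟩
  intro h
  subst h
  rw [PySem.Str.len_eq, PySem.Str.len_eq, ← htl] at hlen
  simp at hlen

theorem expand_config_key_eq (key : String) :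
    expand_config_key key = expand_config_key_alt key := by
  unfold expand_config_key expand_config_key_alt
  show List.foldl
      (fun s pre =>
        if PySem.Str.startswith key (pre ++ "_") && decide (PySem.Str.len pre + 1 < PySem.Str.len key) then
          pvAddLong (PySem.Set.add s (PySem.Str.slice key (some (PySem.Str.len pre + 1)) none))
            (pySplitUnd (PySem.Str.slice key (some (PySem.Str.len pre + 1)) none))
        else s)
      (pvAddLong (PySem.Set.add PySem.Set.empty key) (pySplitUnd key)) pvPrefixes
    = (match pySplitUnd key with
       | p0 :: _ :: _ =>
         if PySem.Set.contains pvPrefixes p0 then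
           if PySem.Str.slice key (some (PySem.Str.len p0 + 1)) none ≠ "" then
             PySem.Set.add (pvAddLong (PySem.Set.add PySem.Set.empty key) (pySplitUnd key))
               (PySem.Str.slice key (some (PySem.Str.len p0 + 1)) none)
           else pvAddLong (PySem.Set.add PySem.Set.empty key) (pySplitUnd key)
         else pvAddLong (PySem.Set.add PySem.Set.empty key) (pySplitUnd key)
       | _ => pvAddLong (PySem.Set.add PySem.Set.empty key) (pySplitUnd key))
  have hfire : ∀ q ∈ pvPrefixes,
      (PySem.Str.startswith key (q ++ "_") && decide (PySem.Str.len q + 1 < PySem.Str.len key)) = true →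
      q = (pySplitUnd key).headD "" := by
    intro q hq hc
    obtain ⟨tl, hkey, -⟩ := cond_eq_first key q hc
    have h1 : splitU key.toList = q.toList :: splitU tl := by
      rw [hkey]; exact splitU_append _ _ (pvPrefixes_no_underscore q hq)
    rw [pySplitUnd_eq, h1]
    simp
  rw [foldl_unique pvPrefixes ((pySplitUnd key).headD "")
        (fun pre => PySem.Str.startswith key (pre ++ "_") && decide (PySem.Str.len pre + 1 < PySem.Str.len key))
        (fun pre s =>
          pvAddLong (PySem.Set.add s (PySem.Str.slice key (some (PySem.Str.len pre + 1)) none))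
            (pySplitUnd (PySem.Str.slice key (some (PySem.Str.len pre + 1)) none)))
        (pvAddLong (PySem.Set.add PySem.Set.empty key) (pySplitUnd key)) pvPrefixes_nodup hfire]
  rw [pySplitUnd_eq key]
  cases hp : splitU key.toList with
  | nil => exact absurd hp (splitU_ne_nil _)
  | cons a rest =>
    cases rest with
    | nil =>
      by_cases hcont : pvPrefixes.contains (String.ofList a) = true
      · have htmem : String.ofList a ∈ pvPrefixes := by simpa using hcont
        have hsw : PySem.Chars.startswith key.toList (a ++ ['_']) = false := by
          by_contra h
          rw [Bool.not_eq_false] at h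
          obtain ⟨tl, htl'⟩ := (PySem.Chars.startswith_iff _ _).mp h
          have hna : '_' ∉ a := by simpa using pvPrefixes_no_underscore _ htmem
          have h2 : splitU key.toList = a :: splitU tl := by
            rw [← htl']; rw [show (a ++ ['_']) ++ tl = a ++ '_' :: tl from by simp]
            exact splitU_append _ _ hna
          rw [hp] at h2
          simp only [List.cons.injEq] at h2
          exact splitU_ne_nil tl h2.2.symm
        simp [hsw]
      · have hnm : String.ofList a ∉ pvPrefixes := by simpa using hcont
        simp [hnm]
    | cons b ps =>
      obtain ⟨hna, tl, hkey, htl⟩ := splitU_two_parts _ a b ps hp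
      by_cases hcont : pvPrefixes.contains (String.ofList a) = true
      case neg =>
        have hnm : String.ofList a ∉ pvPrefixes := by simpa using hcont
        simp [hnm]
      case pos =>
      have htmem : String.ofList a ∈ pvPrefixes := by simpa using hcont
      have hswt : PySem.Chars.startswith key.toList (a ++ ['_']) = true := by
        apply (PySem.Chars.startswith_iff _ _).mpr
        rw [hkey]
        exact ⟨tl, by simp⟩
      have hlenkey : key.toList.length = a.length + 1 + tl.length := by
        rw [hkey]; simp; omega
      have hstr : (PySem.Str.slice key (some ((a.length : Int) + 1)) none).toList = tl := by
        rw [PySem.Str.toList_slice, PySem.Chars.slice_eq_listSlice]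
        rw [show (a.length : Int) + 1 = ((a.length + 1 : Nat) : Int) from by push_cast; ring]
        rw [PySem.List.slice_from_natCast, hkey]
        rw [show a ++ '_' :: tl = (a ++ ['_']) ++ tl from by simp]
        rw [show a.length + 1 = (a ++ ['_']).length from by simp]
        exact List.drop_left
      have hlen0 : PySem.Str.len (String.ofList a) = (a.length : Int) := by
        rw [PySem.Str.len_eq]; simp
      have hsw' : PySem.Str.startswith key (String.ofList a ++ "_") = true := by
        rw [PySem.Str.startswith_eq, String.toList_append]
        rw [show ("_" : String).toList = ['_'] from by decide]
        simpa using hswt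
      by_cases htlnil : tl = []
      · subst htlnil
        have hdecf : decide ((a.length : Int) + 1 < PySem.Str.len key) = false := by
          rw [PySem.Str.len_eq, show key.toList.length = a.length + 1 + ([] : List Char).length from hlenkey]
          simp
        have hstre : PySem.Str.slice key (some ((a.length : Int) + 1)) none = "" :=
          String.toList_eq_nil_iff.mp hstr
        simp only [List.map_cons, List.headD_cons, hlen0]
        rw [hsw', hdecf]
        simp [hstre]
      · have hdect : decide ((a.length : Int) + 1 < PySem.Str.len key) = true := by
          rw [PySem.Str.len_eq, show key.toList.length = a.length + 1 + tl.length from hlenkey]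
          have : 0 < tl.length := List.length_pos_iff.mpr htlnil
          simp
          omega
        have hstrne : PySem.Str.slice key (some ((a.length : Int) + 1)) none ≠ "" := by
          intro h
          rw [h] at hstr
          exact htlnil (by simpa using hstr.symm)
        simp only [List.map_cons, List.headD_cons, hlen0]
        rw [hsw', hdect, hcont]
        simp only [Bool.and_self, Bool.and_true, if_true, hstrne, ne_eq, not_false_eq_true]
        have hcontL : List.contains pvPrefixes (String.ofList a) = true := hcont
        rw [if_pos hcontL]
        apply pvAddLong_of_mem
        intro x hx hxlen
        have hxsub : pySplitUnd (PySem.Str.slice key (some ((a.length : Int) + 1)) none)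
            = String.ofList b :: ps.map String.ofList := by
          rw [pySplitUnd_eq, hstr, htl]
          simp
        rw [hxsub] at hx
        have hxparts : x ∈ String.ofList a :: String.ofList b :: ps.map String.ofList :=
          List.mem_cons_of_mem _ hx
        have hx1 : x ∈ pvAddLong (PySem.Set.add PySem.Set.empty key)
            (String.ofList a :: String.ofList b :: ps.map String.ofList) :=
          mem_pvAddLong _ _ _ hxparts hxlen
        exact (PySem.Set.mem_add _ _ _).mpr (Or.inl hx1)
-- ===== VERDICT (by name: the statement is the Claim_ definition above) =====
theorem expand_config_key_spec : Claim_equal_expand_config_key := by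
  intro key _
  unfold Spec_expand_config_key
  exact expand_config_key_eq key
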